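-- pv_equiv track=rewrite | github.com/luohuayouyiliushuiwuqing/Analyis_PX4 | visualizer.py | compress_modes
-- ===== SOURCE A (Python) =====
-- def compress_modes(mode_times, mode_names, end_time):
--     segments = []
--
--     if len(mode_times) == 0:
--         return segments
--
--     start = mode_times[0]
--     prev_mode = mode_names[0]
--
--     for i in range(1, len(mode_times)):
--         if mode_names[i] != prev_mode:
--             stop = mode_times[i]
--             segments.append((start, stop, prev_mode))
--             start = mode_times[i]
--             prev_mode = mode_names[i]
--
--     # last segment
--     segments.append((start, end_time, prev_mode))
--
--     return segments
-- ===== SOURCE B (Python) =====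
-- def compress_modes(mode_times, mode_names, end_time):
--     if len(mode_times) == 0:
--         return []
--     # pass 1: indices where the mode changes w.r.t. the previous sample
--     starts = [0] + [i for i in range(1, len(mode_times))
--                     if mode_names[i] != mode_names[i - 1]]
--     # pass 2: emit one segment per run start
--     segments = []
--     for j in range(len(starts)):
--         s = starts[j]
--         stop = mode_times[starts[j + 1]] if j + 1 < len(starts) else end_time
--         segments.append((mode_times[s], stop, mode_names[s]))
--     return segments
-- ===== Notes on version B (the rewrite author's own statement) =====
-- stated objective: alternative
-- what changed: Replaces A's single running-start/prev_mode accumulator scan with a two-pass scheme: first build the table of run-boundary indices, then emit one segment per run start, taking each stop from the next start index.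
import Mathlib
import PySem

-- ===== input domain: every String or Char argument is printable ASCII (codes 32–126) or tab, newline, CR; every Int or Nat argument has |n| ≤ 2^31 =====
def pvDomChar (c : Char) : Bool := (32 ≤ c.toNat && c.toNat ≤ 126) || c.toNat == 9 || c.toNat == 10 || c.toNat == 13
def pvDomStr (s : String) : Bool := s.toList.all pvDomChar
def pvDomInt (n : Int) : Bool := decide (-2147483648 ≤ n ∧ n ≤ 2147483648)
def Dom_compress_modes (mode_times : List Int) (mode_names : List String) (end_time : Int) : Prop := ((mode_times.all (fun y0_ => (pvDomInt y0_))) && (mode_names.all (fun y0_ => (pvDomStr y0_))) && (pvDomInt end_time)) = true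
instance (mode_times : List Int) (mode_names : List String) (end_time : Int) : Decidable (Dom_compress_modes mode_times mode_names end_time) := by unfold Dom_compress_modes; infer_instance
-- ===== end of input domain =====

-- B replaces A's single running-start/prev_mode accumulator scan by a two-pass scheme
-- (boundary-index table first, then one emission pass); same O(n) cost (objective: alternative).

-- ===== PORT A =====
-- Python indexing xs[i] is ported as PySem.List.pyGetD; exact whenever the index is in
-- range, which Pre_compress_modes guarantees (out of it Python A raises IndexError).
def compress_modes (mode_times : List Int) (mode_names : List String) (end_time : Int) : List (Int × Int × String) :=
  if mode_times.length = 0 then []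
  else
    let start := PySem.List.pyGetD mode_times 0 0
    let prev_mode := PySem.List.pyGetD mode_names 0 ""
    let st := (PySem.List.pyRange 1 (mode_times.length : Int) 1).foldl
      (fun (st : Int × String × List (Int × Int × String)) i =>
        if PySem.List.pyGetD mode_names i "" ≠ st.2.1 then
          (PySem.List.pyGetD mode_times i 0, PySem.List.pyGetD mode_names i "",
            st.2.2 ++ [(st.1, PySem.List.pyGetD mode_times i 0, st.2.1)])
        else st)
      (start, prev_mode, [])
    st.2.2 ++ [(st.1, end_time, st.2.1)]

-- ===== PORT B =====
def compress_modes_alt (mode_times : List Int) (mode_names : List String) (end_time : Int) : List (Int × Int × String) :=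
  if mode_times.length = 0 then []
  else
    -- pass 1: boundary-index table
    let starts : List Int := 0 :: (PySem.List.pyRange 1 (mode_times.length : Int) 1).filter
      (fun i => PySem.List.pyGetD mode_names i "" ≠ PySem.List.pyGetD mode_names (i - 1) "")
    -- pass 2: emit one segment per run start
    (PySem.List.pyRange 0 (starts.length : Int) 1).foldl
      (fun segs j =>
        let s := PySem.List.pyGetD starts j 0
        let stop := if j + 1 < (starts.length : Int)
          then PySem.List.pyGetD mode_times (PySem.List.pyGetD starts (j + 1) 0) 0
          else end_time
        segs ++ [(PySem.List.pyGetD mode_times s 0, stop, PySem.List.pyGetD mode_names s "")])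
      []

-- ===== PRECONDITION & SPEC =====
-- Pre_ excludes exactly the inputs where Python A raises IndexError: a nonempty
-- mode_times with mode_names shorter than it (B raises there too).
def Pre_compress_modes (mode_times : List Int) (mode_names : List String) (end_time : Int) : Prop :=
  mode_times = [] ∨ mode_times.length ≤ mode_names.length
instance (mode_times : List Int) (mode_names : List String) (end_time : Int) : Decidable (Pre_compress_modes mode_times mode_names end_time) := by unfold Pre_compress_modes; infer_instance
def pvWitness_compress_modes : List Int × List String × Int := ([0, 3, 5], ["a", "a", "b"], 9)

def Spec_compress_modes (mode_times : List Int) (mode_names : List String) (end_time : Int) (out : List (Int × Int × String)) : Prop := out = compress_modes_alt mode_times mode_names end_time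
instance (mode_times : List Int) (mode_names : List String) (end_time : Int) (out : List (Int × Int × String)) : Decidable (Spec_compress_modes mode_times mode_names end_time out) := by unfold Spec_compress_modes; infer_instance

-- ===== CLAIM (what is proved, stated in full; the proofs are below) =====
def Claim_equal_compress_modes : Prop := ∀ (mode_times : List Int) (mode_names : List String) (end_time : Int), Dom_compress_modes mode_times mode_names end_time → Pre_compress_modes mode_times mode_names end_time → Spec_compress_modes mode_times mode_names end_time (compress_modes mode_times mode_names end_time)

-- ===== LEMMAS AND PROOFS =====

-- A's loop body, on Nat indices.
def pvFA (ts : List Int) (ns : List String) (st : Int × String × List (Int × Int × String)) (i : Nat) : Int × String × List (Int × Int × String) :=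
  if ns.getD i "" ≠ st.2.1 then
    (ts.getD i 0, ns.getD i "", st.2.2 ++ [(st.1, ts.getD i 0, st.2.1)])
  else st

-- B's emission pass as structural recursion on the start-index table (Nat indices).
def pvEmit (ts : List Int) (ns : List String) (et : Int) : List Nat → List (Int × Int × String)
  | [] => []
  | s :: rest =>
      (ts.getD s 0, (match rest with | b :: _ => ts.getD b 0 | [] => et), ns.getD s "")
        :: pvEmit ts ns et rest

-- Main invariant: A's accumulator fold over any index range, started at run start s,
-- produces exactly B's emission over (s :: boundaries of that range).
theorem pvMain (ts : List Int) (ns : List String) (et : Int) :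
    ∀ (m k s : Nat) (segs : List (Int × Int × String)), s < k →
      (∀ j, s ≤ j → j < k → ns.getD j "" = ns.getD s "") →
      (let st := (List.range' k m).foldl (pvFA ts ns) (ts.getD s 0, ns.getD s "", segs)
       st.2.2 ++ [(st.1, et, st.2.1)])
        = segs ++ pvEmit ts ns et
            (s :: (List.range' k m).filter (fun i => ns.getD i "" ≠ ns.getD (i - 1) "")) := by
  intro m
  induction m with
  | zero => intro k s segs _ _; simp [pvEmit]
  | succ m ih =>
    intro k s segs hsk hinv
    rw [List.range'_succ]
    have hk1 : ns.getD (k - 1) "" = ns.getD s "" := hinv (k - 1) (by omega) (by omega)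
    by_cases h : ns.getD k "" = ns.getD s ""
    · have hcond : ¬ (ns.getD k "" ≠ ns.getD (k - 1) "") := by rw [h, hk1]; simp
      have hfa : pvFA ts ns (ts.getD s 0, ns.getD s "", segs) k
          = (ts.getD s 0, ns.getD s "", segs) := by
        unfold pvFA; rw [if_neg]; rw [h]; simp
      rw [List.foldl_cons, List.filter_cons, if_neg (by simpa using hcond), hfa]
      exact ih (k + 1) s segs (by omega) (fun j hj1 hj2 => by
        rcases Nat.lt_or_ge j k with hlt | hge
        · exact hinv j hj1 hlt
        · have hj : j = k := by omega
          rw [hj]; exact h)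
    · have hcond : ns.getD k "" ≠ ns.getD (k - 1) "" := by rw [hk1]; exact h
      have hfa : pvFA ts ns (ts.getD s 0, ns.getD s "", segs) k
          = (ts.getD k 0, ns.getD k "", segs ++ [(ts.getD s 0, ts.getD k 0, ns.getD s "")]) := by
        unfold pvFA; rw [if_pos h]
      rw [List.foldl_cons, List.filter_cons, if_pos (by simpa using hcond), hfa]
      have hinv' : ∀ j, k ≤ j → j < k + 1 → ns.getD j "" = ns.getD k "" := by
        intro j hj1 hj2
        have hj : j = k := by omega
        rw [hj]
      rw [ih (k + 1) k (segs ++ [(ts.getD s 0, ts.getD k 0, ns.getD s "")]) (by omega) hinv']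
      rw [List.append_assoc]
      simp [pvEmit]

-- Cast bridges for the 1-based index loops.
theorem pvGetD_one_add {α : Type} (xs : List α) (k : Nat) (d : α) :
    PySem.List.pyGetD xs (1 + (k : Int)) d = xs.getD (1 + k) d := by
  rw [show (1 + (k : Int)) = ((1 + k : Nat) : Int) by push_cast; ring, PySem.List.pyGetD_natCast]

theorem pvGetD_one_add_sub {α : Type} (xs : List α) (k : Nat) (d : α) :
    PySem.List.pyGetD xs (1 + (k : Int) - 1) d = xs.getD (1 + k - 1) d := by
  rw [show (1 + (k : Int) - 1) = ((k : Nat) : Int) by ring, PySem.List.pyGetD_natCast]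
  simp

-- A's port, for nonempty mode_times, as the Nat-indexed fold.
theorem pvA_eq (ts : List Int) (ns : List String) (et : Int) (h : ¬ ts.length = 0) :
    compress_modes ts ns et
      = (let st := (List.range' 1 (ts.length - 1)).foldl (pvFA ts ns)
            (ts.getD 0 0, ns.getD 0 "", [])
         st.2.2 ++ [(st.1, et, st.2.1)]) := by
  unfold compress_modes
  rw [if_neg h, PySem.List.pyRange_one,
    show ((ts.length : Int) - 1).toNat = ts.length - 1 by omega,
    List.range'_eq_map_range]
  simp only [List.foldl_map, pvGetD_one_add, PySem.List.pyGetD_zero, pvFA]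

-- B's boundary table as the Nat-indexed filter.
theorem pvB_starts (ts : List Int) (ns : List String) :
    (PySem.List.pyRange 1 (ts.length : Int) 1).filter
        (fun i => PySem.List.pyGetD ns i "" ≠ PySem.List.pyGetD ns (i - 1) "")
      = ((List.range' 1 (ts.length - 1)).filter
          (fun i => ns.getD i "" ≠ ns.getD (i - 1) "")).map (Nat.cast : Nat → Int) := by
  rw [PySem.List.pyRange_one,
    show ((ts.length : Int) - 1).toNat = ts.length - 1 by omega,
    List.range'_eq_map_range, List.filter_map, List.filter_map, List.map_map]
  have hp : ((fun i => decide (PySem.List.pyGetD ns i "" ≠ PySem.List.pyGetD ns (i - 1) "")) ∘ (fun k : Nat => 1 + (k : Int)))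
      = ((fun i => decide (ns.getD i "" ≠ ns.getD (i - 1) "")) ∘ (fun x : Nat => 1 + x)) := by
    funext k
    simp only [Function.comp_apply, pvGetD_one_add, pvGetD_one_add_sub]
  rw [hp]
  have hf : ((Nat.cast : Nat → Int) ∘ (fun x : Nat => 1 + x)) = (fun k : Nat => 1 + (k : Int)) := by
    funext k
    simp only [Function.comp_apply]
    push_cast
    ring
  rw [hf]

-- B's emission pass over the Nat start table equals pvEmit (structural form).
theorem pvB_emitN (ts : List Int) (ns : List String) (et : Int) :
    ∀ (sN : List Nat) (acc : List (Int × Int × String)),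
      (List.range sN.length).foldl
        (fun segs k => segs ++ [(ts.getD (sN.getD k 0) 0,
            if k + 1 < sN.length then ts.getD (sN.getD (k + 1) 0) 0 else et,
            ns.getD (sN.getD k 0) "")]) acc
      = acc ++ pvEmit ts ns et sN := by
  intro sN
  induction sN with
  | nil => intro acc; simp [pvEmit]
  | cons s rest ih =>
    intro acc
    rw [List.length_cons, List.range_succ_eq_map, List.foldl_cons, List.foldl_map]
    have hbody : (fun segs (k : Nat) => segs ++ [(ts.getD ((s :: rest).getD k.succ 0) 0,
            if k.succ + 1 < rest.length + 1 then ts.getD ((s :: rest).getD (k.succ + 1) 0) 0 else et,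
            ns.getD ((s :: rest).getD k.succ 0) "")])
        = (fun segs (k : Nat) => segs ++ [(ts.getD (rest.getD k 0) 0,
            if k + 1 < rest.length then ts.getD (rest.getD (k + 1) 0) 0 else et,
            ns.getD (rest.getD k 0) "")]) := by
      funext segs k
      simp only [Nat.succ_eq_add_one, List.getD_cons_succ, Nat.add_lt_add_iff_right]
    rw [hbody, ih]
    cases rest with
    | nil => simp [pvEmit]
    | cons b l => simp [pvEmit]

-- Bridge: B's Int-indexed emission fold reduces to the Nat-level pass.
theorem pvB_emit (ts : List Int) (ns : List String) (et : Int) (sN : List Nat) :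
    (PySem.List.pyRange 0 (((sN.map (Nat.cast : Nat → Int)).length : Nat) : Int) 1).foldl
      (fun segs j =>
        let starts := sN.map (Nat.cast : Nat → Int)
        let s := PySem.List.pyGetD starts j 0
        let stop := if j + 1 < (starts.length : Int)
          then PySem.List.pyGetD ts (PySem.List.pyGetD starts (j + 1) 0) 0
          else et
        segs ++ [(PySem.List.pyGetD ts s 0, stop, PySem.List.pyGetD ns s "")])
      []
    = pvEmit ts ns et sN := by
  rw [PySem.List.pyRange_zero_nat, List.foldl_map]
  have hbody : (fun segs (k : Nat) =>
        let starts := sN.map (Nat.cast : Nat → Int)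
        let s := PySem.List.pyGetD starts (k : Int) 0
        let stop := if (k : Int) + 1 < (starts.length : Int)
          then PySem.List.pyGetD ts (PySem.List.pyGetD starts ((k : Int) + 1) 0) 0
          else et
        segs ++ [(PySem.List.pyGetD ts s 0, stop, PySem.List.pyGetD ns s "")])
      = (fun segs (k : Nat) => segs ++ [(ts.getD (sN.getD k 0) 0,
            if k + 1 < sN.length then ts.getD (sN.getD (k + 1) 0) 0 else et,
            ns.getD (sN.getD k 0) "")]) := by
    funext segs k
    have hg : ∀ (m : Nat), PySem.List.pyGetD (sN.map (Nat.cast : Nat → Int)) (m : Int) 0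
        = ((sN.getD m 0 : Nat) : Int) := by
      intro m
      rw [PySem.List.pyGetD_natCast, show (0 : Int) = ((0 : Nat) : Int) by simp, List.getD_map]
    simp only [show ((k : Int) + 1) = ((k + 1 : Nat) : Int) by push_cast; ring, hg,
      PySem.List.pyGetD_natCast, List.length_map, Nat.cast_lt]
  rw [hbody]
  rw [List.length_map] at *
  exact (pvB_emitN ts ns et sN []).trans (by simp)

-- ===== VERDICT (by name: the statement is the Claim_ definition above) =====
theorem compress_modes_spec : Claim_equal_compress_modes := by
  intro ts ns et _ _
  unfold Spec_compress_modes
  by_cases h : ts.length = 0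
  · simp [compress_modes, compress_modes_alt, h]
  · have hinv0 : ∀ j, 0 ≤ j → j < 1 → ns.getD j "" = ns.getD 0 "" := by
      intro j _ hj2
      have hj : j = 0 := by omega
      simp [hj]
    rw [pvA_eq ts ns et h, pvMain ts ns et (ts.length - 1) 1 0 [] (by omega) hinv0]
    unfold compress_modes_alt
    rw [if_neg h, pvB_starts]
    have hcast : ((0 : Int) :: ((List.range' 1 (ts.length - 1)).filter
          (fun i => ns.getD i "" ≠ ns.getD (i - 1) "")).map (Nat.cast : Nat → Int))
        = ((0 :: (List.range' 1 (ts.length - 1)).filter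
          (fun i => ns.getD i "" ≠ ns.getD (i - 1) "")).map (Nat.cast : Nat → Int)) := by
      simp
    rw [hcast, pvB_emit]
    simp
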